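-- pv_equiv track=rewrite | github.com/mvukic/advent-of-code | day_11/solution.py | IfHasSameLetterTwice
-- ===== SOURCE A (Python) =====
-- def IfHasSameLetterTwice(password):
-- 	hasOne=False
-- 	firstLetter = ""
-- 	hasTwo=False
-- 	for i,v in enumerate(password):
-- 		if i >= len(password)-1:
-- 			hasOne = False
-- 			break
-- 		if password[i+1] == v:
-- 			hasOne = True
-- 			firstLetter=v
-- 			break
--
-- 	for i,v in enumerate(password):
-- 		if i >= len(password)-1:
-- 			hasTwo = False
-- 			break
-- 		if v != firstLetter and password[i+1] == v:
-- 			hasTwo = True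
-- 			break
-- 	return hasOne and hasTwo
-- ===== SOURCE B (Python) =====
-- def IfHasSameLetterTwice(password):
--     pairs = set()
--     for x, y in zip(password, password[1:]):
--         if x == y:
--             pairs.add(x)
--     return len(pairs) >= 2
-- ===== Notes on version B (the rewrite author's own statement) =====
-- stated objective: simpler
-- what changed: Replaces A's two find-first scans with firstLetter/hasOne/hasTwo state by a single pass over adjacent character pairs that collects the set of distinct pair-forming letters and checks its size is at least 2.
import Mathlib
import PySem

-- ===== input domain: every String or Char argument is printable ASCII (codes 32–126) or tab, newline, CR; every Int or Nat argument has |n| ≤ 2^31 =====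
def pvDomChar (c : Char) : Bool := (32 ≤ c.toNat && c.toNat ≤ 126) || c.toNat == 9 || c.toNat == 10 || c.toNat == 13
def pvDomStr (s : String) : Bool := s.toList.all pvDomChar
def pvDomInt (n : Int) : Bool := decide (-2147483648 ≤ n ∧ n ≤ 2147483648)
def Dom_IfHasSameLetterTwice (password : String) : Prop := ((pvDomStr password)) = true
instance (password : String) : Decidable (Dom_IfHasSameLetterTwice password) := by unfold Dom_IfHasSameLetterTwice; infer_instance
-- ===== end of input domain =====

-- B replaces A's two find-first scans (firstLetter/hasOne/hasTwo state) by a single pass that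
-- collects the set of distinct letters forming an adjacent pair and checks its size (simpler).

-- ===== PORT A =====

def pvLoopA1 : List Char → Bool × String
  | [] => (false, "")
  | [_] => (false, "")
  | v :: w :: rest => if w = v then (true, String.ofList [v]) else pvLoopA1 (w :: rest)

def pvLoopA2 (firstLetter : String) : List Char → Bool
  | [] => false
  | [_] => false
  | v :: w :: rest =>
      if String.ofList [v] ≠ firstLetter ∧ w = v then true else pvLoopA2 firstLetter (w :: rest)


def IfHasSameLetterTwice (password : String) : Bool :=
  let r := pvLoopA1 password.toList
  let hasOne := r.1
  let firstLetter := r.2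
  let hasTwo := pvLoopA2 firstLetter password.toList
  hasOne && hasTwo

-- ===== PORT B =====
def IfHasSameLetterTwice_alt (password : String) : Bool :=
  let cs := password.toList
  let pairs : PySem.Set Char :=
    (cs.zip (cs.drop 1)).foldl
      (fun s p => if p.1 = p.2 then PySem.Set.add s p.1 else s) PySem.Set.empty
  decide (2 ≤ pairs.length)

-- ===== PRECONDITION & SPEC =====
def Spec_IfHasSameLetterTwice (password : String) (out : Bool) : Prop := out = IfHasSameLetterTwice_alt password
instance (password : String) (out : Bool) : Decidable (Spec_IfHasSameLetterTwice password out) := by unfold Spec_IfHasSameLetterTwice; infer_instance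

-- ===== CLAIM (what is proved, stated in full; the proofs are below) =====
def Claim_equal_IfHasSameLetterTwice : Prop := ∀ (password : String), Dom_IfHasSameLetterTwice password → Spec_IfHasSameLetterTwice password (IfHasSameLetterTwice password)

-- ===== LEMMAS AND PROOFS =====

-- the letters of all adjacent duplicate pairs, in order
def pvPairs : List Char → List Char
  | v :: w :: rest => (if w = v then [v] else []) ++ pvPairs (w :: rest)
  | _ => []

theorem pvLoopA1_eq (cs : List Char) :
    pvLoopA1 cs = match pvPairs cs with
      | [] => (false, "")
      | f :: _ => (true, String.ofList [f]) := by
  induction cs with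
  | nil => rfl
  | cons v t ih =>
    cases t with
    | nil => rfl
    | cons w rest =>
      by_cases h : w = v
      · subst h; simp [pvLoopA1, pvPairs]
      · simp only [pvLoopA1, pvPairs, if_neg h, List.nil_append]
        exact ih

theorem pvLoopA2_eq (fl : String) (cs : List Char) :
    pvLoopA2 fl cs = (pvPairs cs).any (fun c => decide (String.ofList [c] ≠ fl)) := by
  induction cs with
  | nil => rfl
  | cons v t ih =>
    cases t with
    | nil => rfl
    | cons w rest =>
      by_cases h : w = v
      · subst h
        by_cases h2 : String.ofList [w] = fl
        · simp [pvLoopA2, pvPairs, h2, ih]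
        · simp [pvLoopA2, pvPairs, h2]
      · simp [pvLoopA2, pvPairs, h, ih]

theorem pvFoldB_eq (cs : List Char) (s0 : PySem.Set Char) :
    (cs.zip (cs.drop 1)).foldl
      (fun s p => if p.1 = p.2 then PySem.Set.add s p.1 else s) s0
    = (pvPairs cs).foldl PySem.Set.add s0 := by
  induction cs generalizing s0 with
  | nil => rfl
  | cons v t ih =>
    cases t with
    | nil => rfl
    | cons w rest =>
      by_cases h : w = v
      · subst h
        simpa [pvPairs] using ih (PySem.Set.add s0 w)
      · have h' : ¬ (v = w) := fun hh => h hh.symm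
        simpa [pvPairs, h, h'] using ih s0

theorem pvOfListInj (x f : Char) : String.ofList [x] = String.ofList [f] ↔ x = f := by
  constructor
  · intro h
    have h2 : (String.ofList [x]).toList = (String.ofList [f]).toList := by rw [h]
    rw [String.toList_ofList, String.toList_ofList] at h2
    exact List.singleton_injective h2
  · intro h; rw [h]

theorem pvTwoLe_iff (f : Char) (t : List Char) :
    2 ≤ (PySem.Set.ofList (f :: t)).length ↔ ∃ c ∈ t, c ≠ f := by
  constructor
  · intro h
    by_contra hc
    have hc' : ∀ c ∈ t, c = f := fun c hct => by
      by_contra hne; exact hc ⟨c, hct, hne⟩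
    have hall : ∀ c ∈ PySem.Set.ofList (f :: t), c = f := by
      intro c hcmem
      rw [PySem.Set.mem_ofList] at hcmem
      rcases List.mem_cons.mp hcmem with h1 | h2
      · exact h1
      · exact hc' c h2
    have hnd := PySem.Set.nodup_ofList (f :: t)
    match hs : PySem.Set.ofList (f :: t) with
    | [] => rw [hs] at h; simp at h
    | [_] => rw [hs] at h; simp at h
    | a :: b :: r =>
      rw [hs] at hall hnd
      have ha := hall a (by simp)
      have hb := hall b (by simp)
      simp [List.nodup_cons] at hnd
      exact hnd.1.1 (ha.trans hb.symm)
  · rintro ⟨c, hct, hcf⟩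
    have hf : f ∈ PySem.Set.ofList (f :: t) := by
      rw [PySem.Set.mem_ofList]; exact List.mem_cons_self
    have hcmem : c ∈ PySem.Set.ofList (f :: t) := by
      rw [PySem.Set.mem_ofList]; exact List.mem_cons_of_mem _ hct
    rcases List.getElem_of_mem hf with ⟨i, hi, hif⟩
    rcases List.getElem_of_mem hcmem with ⟨j, hj, hjc⟩
    have hij : i ≠ j := by
      intro hh; subst hh
      exact hcf (hjc.symm.trans hif)
    omega

theorem pvMain (cs : List Char) :
    ((pvLoopA1 cs).1 && pvLoopA2 (pvLoopA1 cs).2 cs)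
    = decide (2 ≤ ((cs.zip (cs.drop 1)).foldl
        (fun s p => if p.1 = p.2 then PySem.Set.add s p.1 else s) PySem.Set.empty).length) := by
  rw [pvFoldB_eq, show (PySem.Set.empty : PySem.Set Char) = [] from rfl, ← PySem.Set.ofList_eq_foldl, pvLoopA1_eq, pvLoopA2_eq]
  cases hp : pvPairs cs with
  | nil => simp [PySem.Set.ofList]
  | cons f t =>
    simp only [Bool.true_and]
    rw [Bool.eq_iff_iff]
    simp [List.any_eq_true, pvTwoLe_iff, pvOfListInj]

-- ===== VERDICT (by name: the statement is the Claim_ definition above) =====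
theorem IfHasSameLetterTwice_spec : Claim_equal_IfHasSameLetterTwice := by
  intro password _
  unfold Spec_IfHasSameLetterTwice IfHasSameLetterTwice IfHasSameLetterTwice_alt
  exact pvMain password.toList
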